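-- pv_equiv track=rewrite | github.com/Rancidwhale/CP | Leetcode/BW175/q2.py | minimumK
-- ===== SOURCE A (Python) =====
-- from typing import List
--
-- def minimumK(nums: List[int]) -> int:
--     def ok(k):
--         total=0
--         for i in nums:
--             total+= (i+k-1)//k
--         return total <= k*k
--
--     low = 1
--     high = 10**9
--     while low<high:
--         mid = (low+high)//2
--         if ok(mid):
--             high = mid
--         else:
--             low = mid+1
--     return low
-- ===== SOURCE B (Python) =====
-- def minimumK(nums):
--     # Linear scan: return the first k in A's search range [1, 10**9)
--     # whose ceiling-sum is <= k*k (10**9 if none).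
--     for k in range(1, 10**9):
--         if sum((i + k - 1) // k for i in nums) <= k * k:
--             return k
--     return 10**9
-- ===== Notes on version B (the rewrite author's own statement) =====
-- stated objective: simpler
-- what changed: Replaces the binary search over [1,10**9] with a plain upward linear scan that returns the first k whose ceiling-sum is <= k*k, relying on monotonicity of the predicate for nonnegative elements.
-- outside the precondition, e.g. on minimumK([-7, 1, 1, 1, 1, 1, 1, 1, 1]): A returns 3, B returns 1
import Mathlib
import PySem

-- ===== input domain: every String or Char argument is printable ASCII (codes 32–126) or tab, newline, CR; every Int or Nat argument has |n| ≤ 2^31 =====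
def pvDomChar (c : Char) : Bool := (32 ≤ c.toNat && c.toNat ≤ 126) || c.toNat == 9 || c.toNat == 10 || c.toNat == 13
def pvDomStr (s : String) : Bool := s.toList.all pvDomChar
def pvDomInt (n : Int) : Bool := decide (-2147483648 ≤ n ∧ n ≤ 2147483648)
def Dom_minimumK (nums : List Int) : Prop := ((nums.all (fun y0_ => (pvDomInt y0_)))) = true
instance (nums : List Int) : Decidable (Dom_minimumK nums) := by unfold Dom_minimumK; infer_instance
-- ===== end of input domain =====

-- B replaces A's binary search by a plain upward linear scan (simpler, not faster).

-- ===== PORT A =====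
-- A's inner helper ok(k): total = Σ (i+k-1)//k over nums; total <= k*k
def pvOkA (nums : List Int) (k : Int) : Bool :=
  decide ((nums.foldl (fun total i => total + PySem.Int.floordiv (i + k - 1) k) 0) ≤ k * k)

-- A's while-loop: low < high → mid = (low+high)//2; ok → high = mid, else low = mid+1
def pvBS (nums : List Int) (low high : Int) : Int :=
  if _h : low < high then
    let mid := PySem.Int.floordiv (low + high) 2
    if pvOkA nums mid then pvBS nums low mid else pvBS nums (mid + 1) high
  else low
termination_by (high - low).toNat
decreasing_by
  · have _hb := PySem.Int.floordiv_two_mid_bounds (le_of_lt _h)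
    have hlt : PySem.Int.floordiv (low + high) 2 < high :=
      (PySem.Int.floordiv_lt_iff_lt_mul (by omega)).mpr (by omega)
    omega
  · have hb := PySem.Int.floordiv_two_mid_bounds (le_of_lt _h)
    omega

def minimumK (nums : List Int) : Int := pvBS nums 1 1000000000

-- ===== PORT B =====
-- B's predicate: sum((i+k-1)//k for i in nums) <= k*k
def pvOkB (nums : List Int) (k : Int) : Bool :=
  decide ((nums.map (fun i => PySem.Int.floordiv (i + k - 1) k)).sum ≤ k * k)

-- B's for-loop over range(1, 10**9), fallthrough return 10**9
def pvScan (nums : List Int) (k : Int) : Nat → Int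
  | 0 => 1000000000
  | fuel + 1 => if pvOkB nums k then k else pvScan nums (k + 1) fuel

def minimumK_alt (nums : List Int) : Int := pvScan nums 1 999999999

-- ===== PRECONDITION & SPEC =====
-- Pre_ restricts to the problem's natural domain of nonnegative elements; with a negative
-- element the ceiling-sum predicate is no longer monotone in k, so A's binary search can
-- land on a non-minimal satisfying k — an accidental value nobody would specify.
def Pre_minimumK (nums : List Int) : Prop := ∀ x ∈ nums, 0 ≤ x
instance (nums : List Int) : Decidable (Pre_minimumK nums) := by unfold Pre_minimumK; infer_instance
def pvWitness_minimumK : List Int := [2, 7, 0]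

def Spec_minimumK (nums : List Int) (out : Int) : Prop := out = minimumK_alt nums
instance (nums : List Int) (out : Int) : Decidable (Spec_minimumK nums out) := by unfold Spec_minimumK; infer_instance

-- ===== CLAIM (what is proved, stated in full; the proofs are below) =====
def Claim_equal_minimumK : Prop := ∀ (nums : List Int), Dom_minimumK nums → Pre_minimumK nums → Spec_minimumK nums (minimumK nums)

-- ===== LEMMAS AND PROOFS =====

-- the two predicates are the same function (foldl-sum vs map-sum)
lemma okA_eq_okB (nums : List Int) (k : Int) : pvOkA nums k = pvOkB nums k := by
  unfold pvOkA pvOkB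
  congr 1
  have h : ∀ (l : List Int) (t : Int),
      l.foldl (fun total i => total + PySem.Int.floordiv (i + k - 1) k) t
        = t + (l.map (fun i => PySem.Int.floordiv (i + k - 1) k)).sum := by
    intro l
    induction l with
    | nil => simp
    | cons a l ih => intro t; simp [List.foldl_cons, ih]; ring
  simp [h]

-- ceiling division is antitone in the divisor for nonnegative numerators
lemma ceilDiv_antitone {i k k' : Int} (hi : 0 ≤ i) (hk : 1 ≤ k) (hkk : k ≤ k') :
    PySem.Int.floordiv (i + k' - 1) k' ≤ PySem.Int.floordiv (i + k - 1) k := by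
  set q := PySem.Int.floordiv (i + k - 1) k with hq
  have hq0 : 0 ≤ q := (PySem.Int.le_floordiv_iff_mul_le (a := i + k - 1) (by omega)).mpr (by omega)
  have hub : q < q + 1 := by omega
  have h1 : i + k - 1 < (q + 1) * k :=
    (PySem.Int.floordiv_lt_iff_lt_mul (by omega)).mp (by omega)
  have h2 : i ≤ q * k := by nlinarith
  have h3 : q * k ≤ q * k' := by nlinarith
  have : i + k' - 1 < (q + 1) * k' := by nlinarith
  have := (PySem.Int.floordiv_lt_iff_lt_mul (a := i + k' - 1) (b := k') (q := q + 1) (by omega)).mpr this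
  omega

-- monotonicity of the predicate over nonnegative inputs
lemma okB_mono {nums : List Int} (hpre : ∀ x ∈ nums, 0 ≤ x) {k k' : Int}
    (hk : 1 ≤ k) (hkk : k ≤ k') (hok : pvOkB nums k = true) : pvOkB nums k' = true := by
  unfold pvOkB at *
  rw [decide_eq_true_eq] at *
  have hsum : (nums.map (fun i => PySem.Int.floordiv (i + k' - 1) k')).sum
      ≤ (nums.map (fun i => PySem.Int.floordiv (i + k - 1) k)).sum := by
    apply List.sum_le_sum
    intro i hi
    exact ceilDiv_antitone (hpre i hi) hk hkk
  have hsq : k * k ≤ k' * k' := by nlinarith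
  omega

-- characterisation of B's scan: first satisfying k in [start, 10^9), else 10^9
lemma scan_spec (nums : List Int) : ∀ (fuel : Nat) (k : Int), 1 ≤ k →
    k + (fuel : Int) = 1000000000 →
    k ≤ pvScan nums k fuel ∧ pvScan nums k fuel ≤ 1000000000 ∧
    (∀ j, k ≤ j → j < pvScan nums k fuel → pvOkB nums j = false) ∧
    (pvOkB nums (pvScan nums k fuel) = true ∨ pvScan nums k fuel = 1000000000) := by
  intro fuel
  induction fuel with
  | zero =>
    intro k hk hsum
    have h0 : pvScan nums k 0 = 1000000000 := rfl
    rw [h0]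
    refine ⟨by omega, by omega, ?_, Or.inr rfl⟩
    intro j hj hj'
    exact absurd hj' (by omega)
  | succ n ih =>
    intro k hk hsum
    push_cast at hsum
    by_cases hok : pvOkB nums k = true
    · have h0 : pvScan nums k (n + 1) = k := by simp only [pvScan, if_pos hok]
      rw [h0]
      refine ⟨le_refl _, by omega, ?_, Or.inl hok⟩
      intro j hj hj'
      exact absurd hj' (by omega)
    · have hok' : pvOkB nums k = false := by simpa using hok
      have h0 : pvScan nums k (n + 1) = pvScan nums (k + 1) n := by
        simp only [pvScan, if_neg hok]
      rw [h0]
      obtain ⟨h1, h2, h3, h4⟩ := ih (k + 1) (by omega) (by omega)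
      refine ⟨by omega, h2, ?_, h4⟩
      intro j hj hj'
      rcases eq_or_lt_of_le hj with rfl | hlt
      · exact hok'
      · exact h3 j (by omega) hj'

-- A's binary search converges to r when r is the first satisfying point (or the cap)
lemma bs_eq (nums : List Int) (r : Int)
    (hmono : ∀ k k', 1 ≤ k → k ≤ k' → pvOkA nums k = true → pvOkA nums k' = true)
    (hfirst : ∀ j, 1 ≤ j → j < r → pvOkA nums j = false)
    (hok : pvOkA nums r = true ∨ r = 1000000000) :
    ∀ (low high : Int), 1 ≤ low → low ≤ r → r ≤ high → high ≤ 1000000000 →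
    pvBS nums low high = r := by
  intro low high h1 h2 h3 h4
  rw [pvBS]
  by_cases hlt : low < high
  · rw [dif_pos hlt]
    have hb := PySem.Int.floordiv_two_mid_bounds (le_of_lt hlt)
    have hmidlt : PySem.Int.floordiv (low + high) 2 < high :=
      (PySem.Int.floordiv_lt_iff_lt_mul (by omega)).mpr (by omega)
    set mid := PySem.Int.floordiv (low + high) 2 with hmid
    by_cases hom : pvOkA nums mid = true
    · rw [if_pos hom]
      have hrmid : r ≤ mid := by
        by_contra hc
        have := hfirst mid (by omega) (by omega)
        rw [hom] at this; exact Bool.true_eq_false.mp this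
      exact bs_eq nums r hmono hfirst hok low mid (by omega) h2 hrmid (by omega)
    · rw [if_neg hom]
      have hom' : pvOkA nums mid = false := by simpa using hom
      have hmidr : mid < r := by
        by_contra hc
        have hc' : r ≤ mid := by omega
        rcases hok with hokr | hcap
        · have := hmono r mid (by omega) hc' hokr
          rw [hom'] at this; exact Bool.false_ne_true this
        · omega
      exact bs_eq nums r hmono hfirst hok (mid + 1) high (by omega) (by omega) h3 h4
  · rw [dif_neg hlt]
    omega
termination_by low high => (high - low).toNat
decreasing_by
  all_goals omega

-- ===== VERDICT (by name: the statement is the Claim_ definition above) =====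
theorem minimumK_spec : Claim_equal_minimumK := by
  intro nums _ hpre
  unfold Spec_minimumK minimumK minimumK_alt
  have hs := scan_spec nums 999999999 1 (by omega) (by norm_num)
  obtain ⟨h1, h2, h3, h4⟩ := hs
  set r := pvScan nums 1 999999999 with hr
  have hmono : ∀ k k', 1 ≤ k → k ≤ k' → pvOkA nums k = true → pvOkA nums k' = true := by
    intro k k' hk hkk hok
    rw [okA_eq_okB] at *
    exact okB_mono hpre hk hkk hok
  have hfirst : ∀ j, 1 ≤ j → j < r → pvOkA nums j = false := by
    intro j hj hj'
    rw [okA_eq_okB]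
    exact h3 j hj hj'
  have hok : pvOkA nums r = true ∨ r = 1000000000 := by
    rw [okA_eq_okB]; exact h4
  exact bs_eq nums r hmono hfirst hok 1 1000000000 (by omega) h1 h2 (by omega)
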